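-- pv_equiv track=rewrite | github.com/yimingwu510/TAG | TTP Entity Recognition/TTP.py | wp
-- ===== SOURCE A (Python) =====
-- from collections import Counter
--
-- def wp(dep,seg):
--     c = 0
--     wp=[]
--     wp_result=[]
--     for i in dep[0]:
--         if i[2]=='WP':
--             c=c+1
--             wp.append(i[1])
--
--     b = dict(Counter(wp))
--     wp_center=[key for key,value in b.items()if value > 1]
--
--     arra=[]
--     for i in wp_center:
--         c_list = []
--         for j in dep[0]:
--             if j[1]==i and j[2]=="WP":
--                 c1=j[0]
--                 c_list.append(c1)
--         arra.append(c_list)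
--
--     for i in arra:
--         head=i[0]
--         wei=i[1]
--         c=head+1
--         str1=[]
--         while(c<wei):
--             str1.append(seg[0][c-1])
--             c = c + 1
--         s = "".join(str1)
--         wp_result.append(s)
--     return wp_result
-- ===== SOURCE B (Python) =====
-- def wp(dep, seg):
--     groups = {}
--     for idx, word, tag in dep[0]:
--         if tag == 'WP':
--             groups.setdefault(word, []).append(idx)
--     return ["".join(seg[0][c - 1] for c in range(ps[0] + 1, ps[1]))
--             for ps in groups.values() if len(ps) > 1]
-- ===== Notes on version B (the rewrite author's own statement) =====
-- stated objective: simpler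
-- what changed: B replaces A's Counter pass plus a full rescan of dep[0] for every duplicated WP word with a single grouping pass building one dict from each WP word to its list of positions, then emits a span per word with more than one position.
import Mathlib
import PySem

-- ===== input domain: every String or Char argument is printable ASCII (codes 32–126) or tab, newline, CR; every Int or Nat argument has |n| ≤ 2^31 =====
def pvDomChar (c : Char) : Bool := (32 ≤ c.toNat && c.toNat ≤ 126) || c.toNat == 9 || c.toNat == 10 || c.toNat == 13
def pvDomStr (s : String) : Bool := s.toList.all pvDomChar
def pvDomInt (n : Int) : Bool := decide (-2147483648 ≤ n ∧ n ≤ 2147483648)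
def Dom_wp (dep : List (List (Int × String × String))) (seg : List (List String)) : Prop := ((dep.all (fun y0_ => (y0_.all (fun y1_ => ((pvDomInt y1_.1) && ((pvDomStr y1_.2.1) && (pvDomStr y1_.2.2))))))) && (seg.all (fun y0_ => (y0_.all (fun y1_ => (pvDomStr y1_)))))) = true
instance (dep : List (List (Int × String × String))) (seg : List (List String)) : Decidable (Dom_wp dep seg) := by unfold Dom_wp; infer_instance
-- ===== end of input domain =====

-- B replaces A's Counter pass plus per-center rescans of dep[0] with a single grouping pass into
-- one dict (word -> positions), then emits a span per duplicated WP word; shorter and plainer.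

-- ===== PORT A =====
-- the 'while(c<wei): str1.append(seg[0][c-1]); c=c+1' loop of A
def wpWhile (seg0 : List String) (c wei : Int) : List String :=
  if c < wei then PySem.List.pyGetD seg0 (c - 1) "" :: wpWhile seg0 (c + 1) wei else []
termination_by (wei - c).toNat
decreasing_by omega

def wp (dep : List (List (Int × String × String))) (seg : List (List String)) : List String :=
  let dep0 := (PySem.List.pyGet? dep 0).getD []
  -- first loop: c counter and the list 'wp' of WP head words
  let cwp := dep0.foldl (fun (acc : Int × List String) i =>
      if i.2.2 == "WP" then (acc.1 + 1, acc.2 ++ [i.2.1]) else acc) (0, [])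
  -- b = dict(Counter(wp)); wp_center = [key for key,value in b.items() if value > 1]
  let b := PySem.Dict.counter cwp.2
  let wpCenter := (b.items.filter (fun kv => 1 < kv.2)).map (fun kv => kv.1)
  -- arra: per center, rescan dep[0] collecting positions
  let arra := wpCenter.foldl (fun acc i =>
      acc ++ [dep0.foldl (fun cl j => if j.2.1 == i && j.2.2 == "WP" then cl ++ [j.1] else cl) []]) []
  -- final loop: head = i[0], wei = i[1]; while loop; join
  arra.foldl (fun res i =>
      let head := PySem.List.pyGetD i 0 0
      let wei := PySem.List.pyGetD i 1 0
      res ++ [PySem.Str.join "" (wpWhile ((PySem.List.pyGet? seg 0).getD []) (head + 1) wei)]) []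

-- ===== PORT B =====
def wp_alt (dep : List (List (Int × String × String))) (seg : List (List String)) : List String :=
  let dep0 := (PySem.List.pyGet? dep 0).getD []
  -- groups.setdefault(word, []).append(idx)  ==  modify word [] (· ++ [idx])
  let groups := dep0.foldl (fun d i =>
      if i.2.2 == "WP" then d.modify i.2.1 ([] : List Int) (fun v => v ++ [i.1]) else d)
      PySem.Dict.empty
  (groups.values.filter (fun ps => 1 < ps.length)).map (fun ps =>
    PySem.Str.join "" ((PySem.List.pyRange (PySem.List.pyGetD ps 0 0 + 1) (PySem.List.pyGetD ps 1 0) 1).map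
      (fun c => PySem.List.pyGetD ((PySem.List.pyGet? seg 0).getD []) (c - 1) "")))

-- ===== PRECONDITION & SPEC =====
-- Pre_ excludes exactly the inputs where the Python raises IndexError: dep = [] (dep[0]),
-- and any duplicated WP word whose span loop reaches an index of seg[0] outside [-len, len).
def Pre_wp (dep : List (List (Int × String × String))) (seg : List (List String)) : Prop :=
  dep ≠ [] ∧
  ∀ j ∈ dep.headD [], j.2.2 = "WP" →
    (((dep.headD []).filter (fun k => k.2.1 == j.2.1 && k.2.2 == "WP")).map (fun k => k.1)).length ≥ 2 →
    (((dep.headD []).filter (fun k => k.2.1 == j.2.1 && k.2.2 == "WP")).map (fun k => k.1)).getD 0 0 + 1 <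
      (((dep.headD []).filter (fun k => k.2.1 == j.2.1 && k.2.2 == "WP")).map (fun k => k.1)).getD 1 0 →
    (-(((seg.headD []).length : Int)) ≤ (((dep.headD []).filter (fun k => k.2.1 == j.2.1 && k.2.2 == "WP")).map (fun k => k.1)).getD 0 0 ∧
      (((dep.headD []).filter (fun k => k.2.1 == j.2.1 && k.2.2 == "WP")).map (fun k => k.1)).getD 1 0 - 2 < ((seg.headD []).length : Int))
instance (dep : List (List (Int × String × String))) (seg : List (List String)) : Decidable (Pre_wp dep seg) := by unfold Pre_wp; infer_instance

def pvWitness_wp : (List (List (Int × String × String))) × List (List String) :=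
  ([[(1, "who", "WP"), (2, "is", "VBZ"), (3, "who", "WP")]], [["a", "b", "c"]])

def Spec_wp (dep : List (List (Int × String × String))) (seg : List (List String)) (out : List String) : Prop := out = wp_alt dep seg
instance (dep : List (List (Int × String × String))) (seg : List (List String)) (out : List String) : Decidable (Spec_wp dep seg out) := by unfold Spec_wp; infer_instance

-- ===== CLAIM (what is proved, stated in full; the proofs are below) =====
def Claim_equal_wp : Prop := ∀ (dep : List (List (Int × String × String))) (seg : List (List String)), Dom_wp dep seg → Pre_wp dep seg → Spec_wp dep seg (wp dep seg)

-- ===== LEMMAS AND PROOFS =====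

-- A's first loop: the second component collects the WP head words.
theorem pairFold_snd (l : List (Int × String × String)) (acc : Int × List String) :
    (l.foldl (fun (acc : Int × List String) i =>
      if i.2.2 == "WP" then (acc.1 + 1, acc.2 ++ [i.2.1]) else acc) acc).2 =
    acc.2 ++ (l.filter (fun i => i.2.2 == "WP")).map (fun i => i.2.1) := by
  induction l generalizing acc with
  | nil => simp
  | cons x xs ih =>
    cases hx : (x.2.2 == "WP") <;>
      (simp only [List.foldl_cons, List.filter_cons, hx, reduceIte]; rw [ih]; simp)

-- B's guarded dict fold equals the unguarded fold over the filtered list.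
theorem dictFold_filter (l : List (Int × String × String)) (d : PySem.Dict String (List Int)) :
    l.foldl (fun d i =>
      if i.2.2 == "WP" then d.modify i.2.1 ([] : List Int) (fun v => v ++ [i.1]) else d) d =
    (l.filter (fun i => i.2.2 == "WP")).foldl
      (fun d i => d.modify i.2.1 ([] : List Int) (fun v => v ++ [i.1])) d := by
  induction l generalizing d with
  | nil => rfl
  | cons x xs ih =>
    cases hx : (x.2.2 == "WP") <;>
      (simp only [List.foldl_cons, List.filter_cons, hx, reduceIte]; rw [ih]; try simp)

-- A's while loop is a map over range(head+1, wei).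
theorem wpWhile_eq (seg0 : List String) (c wei : Int) :
    wpWhile seg0 c wei =
      (PySem.List.pyRange c wei 1).map (fun j => PySem.List.pyGetD seg0 (j - 1) "") := by
  by_cases h : c < wei
  · rw [wpWhile, if_pos h, PySem.List.pyRange_one_cons h, List.map_cons, wpWhile_eq seg0 (c + 1) wei]
  · rw [wpWhile, if_neg h, PySem.List.pyRange_one_eq_nil (by omega), List.map_nil]
termination_by (wei - c).toNat
decreasing_by omega

-- ===== VERDICT (by name: the statement is the Claim_ definition above) =====
theorem wp_spec : Claim_equal_wp := by
  intro dep seg _ _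
  show wp dep seg = wp_alt dep seg
  simp only [wp, wp_alt]
  generalize (PySem.List.pyGet? dep 0).getD [] = l
  generalize (PySem.List.pyGet? seg 0).getD [] = s0
  simp only [pairFold_snd, dictFold_filter, List.nil_append, wpWhile_eq,
    PySem.List.foldl_append_if, PySem.List.foldl_append_singleton_eq_map,
    PySem.Dict.items_counter, List.filter_map, List.map_map]
  have hGW : List.foldl (fun d i => d.modify i.2.1 ([] : List Int) fun v => v ++ [i.1])
        PySem.Dict.empty (List.filter (fun i => i.2.2 == "WP") l)
      = List.foldl (fun d p => d.modify p.1 ([] : List Int) fun v => v ++ [p.2]) PySem.Dict.empty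
          ((List.filter (fun i => i.2.2 == "WP") l).map (fun i => (i.2.1, i.1))) :=
    (List.foldl_map (f := fun i : Int × String × String => (i.2.1, i.1))
      (g := fun (d : PySem.Dict String (List Int)) (p : String × Int) =>
        d.modify p.1 ([] : List Int) fun v => v ++ [p.2])).symm
  have hkeys : (List.foldl (fun d i => d.modify i.2.1 ([] : List Int) fun v => v ++ [i.1])
        PySem.Dict.empty (List.filter (fun i => i.2.2 == "WP") l)).keys
      = PySem.Set.ofList ((List.filter (fun i => i.2.2 == "WP") l).map (fun i => i.2.1)) :=
    PySem.Dict.keys_foldl_modify_key (List.filter (fun i => i.2.2 == "WP") l)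
      (fun i : Int × String × String => i.2.1) []
      (fun (_ : PySem.Dict String (List Int)) (i : Int × String × String) (v : List Int) => v ++ [i.1])
      PySem.Dict.empty
  have hnodup : (List.foldl (fun d i => d.modify i.2.1 ([] : List Int) fun v => v ++ [i.1])
        PySem.Dict.empty (List.filter (fun i => i.2.2 == "WP") l)).keys.Nodup :=
    PySem.Dict.nodup_keys_foldl_modify_key (List.filter (fun i => i.2.2 == "WP") l)
      (fun i : Int × String × String => i.2.1) []
      (fun (_ : PySem.Dict String (List Int)) (i : Int × String × String) (v : List Int) => v ++ [i.1])
      PySem.Dict.empty PySem.Dict.nodup_keys_empty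
  have hget : ∀ k : String, (List.foldl (fun d i => d.modify i.2.1 ([] : List Int) fun v => v ++ [i.1])
        PySem.Dict.empty (List.filter (fun i => i.2.2 == "WP") l)).getD k []
      = List.map Prod.fst (List.filter (fun j => j.2.1 == k && j.2.2 == "WP") l) := by
    intro k
    rw [hGW, PySem.Dict.getD_foldl_modify_append, PySem.Dict.getD_empty, List.nil_append,
      List.filter_map, List.map_map, List.filter_filter]
    simp [Function.comp_def]
  have hcnt : ∀ k : String,
      List.count k ((List.filter (fun i => i.2.2 == "WP") l).map (fun i => i.2.1))
      = (List.map Prod.fst (List.filter (fun j => j.2.1 == k && j.2.2 == "WP") l)).length := by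
    intro k
    rw [List.count_eq_countP, List.countP_map, List.countP_eq_length_filter, List.length_map,
      List.filter_filter]
    simp
  rw [PySem.Dict.values_eq_map_keys _ hnodup ([] : List Int), hkeys, List.filter_map, List.map_map]
  have hfilter := List.filter_congr
      (l := PySem.Set.ofList (List.map (fun i => i.2.1) (List.filter (fun i => i.2.2 == "WP") l)))
      (p := (fun kv => decide (1 < kv.2)) ∘ fun k =>
        (k, (↑(List.count k (List.map (fun i => i.2.1) (List.filter (fun i => i.2.2 == "WP") l))) : Int)))
      (q := (fun ps => decide (1 < ps.length)) ∘ fun k =>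
        (List.foldl (fun d i => d.modify i.2.1 [] fun v => v ++ [i.1]) PySem.Dict.empty
          (List.filter (fun i => i.2.2 == "WP") l)).getD k [])
      (fun k _ => by simp only [Function.comp_apply, hcnt k, hget k, Nat.one_lt_cast])
  rw [hfilter]
  exact List.map_congr_left (fun k _ => by simp only [Function.comp_apply, hget k])
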